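-- pv_equiv track=rewrite | github.com/shadmansakib018/nqueens_puzzleSolver | appQueens/views.py | compute
-- ===== SOURCE A (Python) =====
-- def fitness_func(a):
--   fv=0
--   for i in range(len(a)):
--     j=i+1
--     while(j<len(a)):
--       if((a[i]!=a[j])and(a[j]!=a[i]+(j-i))and(a[j]!=a[i]-(j-i))):
--         fv=fv+2
--       j=j+1
--   return (fv/2)
--
-- def compute(population,max_fit):
--   sol=[]
--   for i in range(len(population)):
--     x=fitness_func(population[i])
--     if(x==max_fit):
--       flag=True
--       sol=population[i]
--       break
--   return sol
-- ===== SOURCE B (Python) =====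
-- def _fitness(a):
--     rows = {}
--     diag = {}
--     anti = {}
--     att = 0
--     for i, v in enumerate(a):
--         att += rows.get(v, 0) + diag.get(v - i, 0) + anti.get(v + i, 0)
--         rows[v] = rows.get(v, 0) + 1
--         diag[v - i] = diag.get(v - i, 0) + 1
--         anti[v + i] = anti.get(v + i, 0) + 1
--     n = len(a)
--     return n * (n - 1) // 2 - att
--
-- def compute(population, max_fit):
--     for member in population:
--         if _fitness(member) == max_fit:
--             return member
--     return []
-- ===== Notes on version B (the rewrite author's own statement) =====
-- stated objective: faster
-- what changed: Replaces the quadratic all-pairs scan per population member by a single pass that counts same-row/same-diagonal collisions with hash-map counters and subtracts the attacking pairs from C(n,2).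
import Mathlib
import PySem

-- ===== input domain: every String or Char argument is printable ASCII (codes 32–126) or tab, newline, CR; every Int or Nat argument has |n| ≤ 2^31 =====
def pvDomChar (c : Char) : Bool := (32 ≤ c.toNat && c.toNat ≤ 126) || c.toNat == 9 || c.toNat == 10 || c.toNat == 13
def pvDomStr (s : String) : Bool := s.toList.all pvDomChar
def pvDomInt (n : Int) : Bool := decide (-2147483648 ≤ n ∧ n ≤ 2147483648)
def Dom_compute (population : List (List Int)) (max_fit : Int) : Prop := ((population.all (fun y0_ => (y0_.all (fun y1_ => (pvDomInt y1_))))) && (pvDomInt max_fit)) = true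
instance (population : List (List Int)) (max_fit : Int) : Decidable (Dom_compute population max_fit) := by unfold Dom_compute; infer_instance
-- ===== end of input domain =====

-- B computes each fitness in one pass with row/diagonal counters instead of A's all-pairs scan (asymptotically faster per member).

-- ===== PORT A =====
-- fitness_func: nested loop over index pairs i < j; a[i]/a[j] are always in range, so
-- PySem.List.pyGetD a _ 0 is exact here.  Python returns fv/2 (true division, a float);
-- fv is incremented only by 2 so fv/2 is the integer PySem.Int.floordiv fv 2.
def fitnessA (a : List Int) : Int :=
  let n : Int := a.length
  let fv : Int :=
    (PySem.List.pyRange 0 n 1).foldl (fun fv i =>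
      (PySem.List.pyRange (i + 1) n 1).foldl (fun fv j =>
        if PySem.List.pyGetD a i 0 ≠ PySem.List.pyGetD a j 0 ∧
           PySem.List.pyGetD a j 0 ≠ PySem.List.pyGetD a i 0 + (j - i) ∧
           PySem.List.pyGetD a j 0 ≠ PySem.List.pyGetD a i 0 - (j - i)
        then fv + 2 else fv) fv) 0
  PySem.Int.floordiv fv 2

-- the loop over population with break = first member whose fitness equals max_fit; sol=[] otherwise
def compute (population : List (List Int)) (max_fit : Int) : List Int :=
  match population with
  | [] => []
  | p :: rest => if fitnessA p = max_fit then p else compute rest max_fit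

-- ===== PORT B =====
-- one pass over enumerate(a) maintaining three dict counters; att accumulates, for each
-- element, the number of earlier elements in the same row / diagonal / anti-diagonal.
def fitnessB (a : List Int) : Int :=
  let st :=
    (PySem.List.enumerate a).foldl
      (fun (st : PySem.Dict Int Int × PySem.Dict Int Int × PySem.Dict Int Int × Int) iv =>
        let rows := st.1; let diag := st.2.1; let anti := st.2.2.1; let att := st.2.2.2
        let i := iv.1; let v := iv.2
        let att := att + rows.getD v 0 + diag.getD (v - i) 0 + anti.getD (v + i) 0
        let rows := rows.insert v (rows.getD v 0 + 1)
        let diag := diag.insert (v - i) (diag.getD (v - i) 0 + 1)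
        let anti := anti.insert (v + i) (anti.getD (v + i) 0 + 1)
        (rows, diag, anti, att))
      (PySem.Dict.empty, PySem.Dict.empty, PySem.Dict.empty, 0)
  let n : Int := a.length
  PySem.Int.floordiv (n * (n - 1)) 2 - st.2.2.2

def compute_alt (population : List (List Int)) (max_fit : Int) : List Int :=
  match population with
  | [] => []
  | member :: rest => if fitnessB member = max_fit then member else compute_alt rest max_fit

-- ===== PRECONDITION & SPEC =====
def Spec_compute (population : List (List Int)) (max_fit : Int) (out : List Int) : Prop := out = compute_alt population max_fit
instance (population : List (List Int)) (max_fit : Int) (out : List Int) : Decidable (Spec_compute population max_fit out) := by unfold Spec_compute; infer_instance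

-- ===== CLAIM (what is proved, stated in full; the proofs are below) =====
def Claim_equal_compute : Prop := ∀ (population : List (List Int)) (max_fit : Int), Dom_compute population max_fit → Spec_compute population max_fit (compute population max_fit)

-- ===== LEMMAS AND PROOFS =====

-- per-pair terms: a pair at distance d is non-attacking (A counts 2) or attacking
-- in exactly one of the three ways (B counts 1)
def non2 (u v d : Int) : Int := if u ≠ v ∧ v ≠ u + d ∧ v ≠ u - d then 2 else 0
def eqs3 (u v d : Int) : Int :=
  (if v = u then 1 else 0) + (if v = u + d then 1 else 0) + (if v = u - d then 1 else 0)

-- sums over ordered pairs of an (index, value) list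
def sumE (f : Int → Int → Int → Int) (x : Int × Int) : List (Int × Int) → Int
  | [] => 0
  | y :: t => f x.2 y.2 (y.1 - x.1) + sumE f x t

def pairE (f : Int → Int → Int → Int) : List (Int × Int) → Int
  | [] => 0
  | x :: t => sumE f x t + pairE f t

theorem pointwise (u v d : Int) (hd : d ≠ 0) : non2 u v d = 2 - 2 * eqs3 u v d := by
  unfold non2 eqs3; split_ifs <;> omega

theorem sumE_pointwise (x : Int × Int) (t : List (Int × Int))
    (h : ∀ y ∈ t, x.1 < y.1) :
    sumE non2 x t = 2 * sumE (fun _ _ _ => 1) x t - 2 * sumE eqs3 x t := by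
  induction t with
  | nil => simp [sumE]
  | cons y t ih =>
    have hy := h y (by simp)
    have hrec := ih (fun z hz => h z (by simp [hz]))
    simp only [sumE]
    rw [pointwise _ _ _ (by omega)]
    omega

theorem pairE_pointwise (l : List (Int × Int)) (h : l.Pairwise (fun p q => p.1 < q.1)) :
    pairE non2 l = 2 * pairE (fun _ _ _ => 1) l - 2 * pairE eqs3 l := by
  induction l with
  | nil => simp [pairE]
  | cons x t ih =>
    rcases List.pairwise_cons.mp h with ⟨hx, ht⟩
    simp only [pairE]
    rw [sumE_pointwise x t hx, ih ht]
    ring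

theorem sumE_one (x : Int × Int) (t : List (Int × Int)) :
    sumE (fun _ _ _ => 1) x t = (t.length : Int) := by
  induction t with
  | nil => simp [sumE]
  | cons y t ih => simp [sumE, ih]; omega

theorem pairE_one_two (l : List (Int × Int)) :
    2 * pairE (fun _ _ _ => 1) l = (l.length : Int) * ((l.length : Int) - 1) := by
  induction l with
  | nil => simp [pairE]
  | cons x t ih =>
    simp only [pairE, sumE_one, List.length_cons]
    push_cast
    linear_combination ih

theorem sumE_eq_sum_map (f : Int → Int → Int → Int) (x : Int × Int) (t : List (Int × Int)) :
    sumE f x t = (t.map (fun y => f x.2 y.2 (y.1 - x.1))).sum := by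
  induction t with
  | nil => simp [sumE]
  | cons y t ih => simp [sumE, ih]

-- ===== A-side: the nested pyRange fold equals pairE non2 (enumerate a) =====

theorem innerRange_eq (a : List Int) (f : Int → Int → Int → Int) (n : Int) :
    ∀ (k : Nat) (i s : Int), (n - s).toNat = k →
    sumE f (i, PySem.List.pyGetD a i 0)
        ((PySem.List.pyRange s n 1).map (fun j => (j, PySem.List.pyGetD a j 0)))
      = ((PySem.List.pyRange s n 1).map
          (fun j => f (PySem.List.pyGetD a i 0) (PySem.List.pyGetD a j 0) (j - i))).sum
  | 0, i, s, hk => by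
    rw [PySem.List.pyRange_one_eq_nil (by omega)]; simp [sumE]
  | (k+1), i, s, hk => by
    rw [PySem.List.pyRange_one_cons (by omega)]
    simp only [List.map_cons, sumE, List.sum_cons]
    rw [innerRange_eq a f n k i (s+1) (by omega)]

theorem outerRange_eq (a : List Int) (f : Int → Int → Int → Int) (n : Int) :
    ∀ (k : Nat) (s : Int), (n - s).toNat = k →
    ((PySem.List.pyRange s n 1).map (fun i =>
        ((PySem.List.pyRange (i+1) n 1).map
          (fun j => f (PySem.List.pyGetD a i 0) (PySem.List.pyGetD a j 0) (j - i))).sum)).sum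
      = pairE f ((PySem.List.pyRange s n 1).map (fun j => (j, PySem.List.pyGetD a j 0)))
  | 0, s, hk => by
    rw [PySem.List.pyRange_one_eq_nil (by omega)]; simp [pairE]
  | (k+1), s, hk => by
    rw [PySem.List.pyRange_one_cons (by omega)]
    simp only [List.map_cons, List.sum_cons, pairE]
    rw [outerRange_eq a f n k (s+1) (by omega),
        innerRange_eq a f n k s (s+1) (by omega)]

theorem fvA_eq (a : List Int) :
    (PySem.List.pyRange 0 (a.length : Int) 1).foldl (fun fv i =>
      (PySem.List.pyRange (i + 1) (a.length : Int) 1).foldl (fun fv j =>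
        if PySem.List.pyGetD a i 0 ≠ PySem.List.pyGetD a j 0 ∧
           PySem.List.pyGetD a j 0 ≠ PySem.List.pyGetD a i 0 + (j - i) ∧
           PySem.List.pyGetD a j 0 ≠ PySem.List.pyGetD a i 0 - (j - i)
        then fv + 2 else fv) fv) 0
    = pairE non2 (PySem.List.enumerate a) := by
  have hinner : ∀ (i fv : Int),
      (PySem.List.pyRange (i + 1) (a.length : Int) 1).foldl (fun fv j =>
        if PySem.List.pyGetD a i 0 ≠ PySem.List.pyGetD a j 0 ∧
           PySem.List.pyGetD a j 0 ≠ PySem.List.pyGetD a i 0 + (j - i) ∧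
           PySem.List.pyGetD a j 0 ≠ PySem.List.pyGetD a i 0 - (j - i)
        then fv + 2 else fv) fv
      = fv + ((PySem.List.pyRange (i + 1) (a.length : Int) 1).map
          (fun j => non2 (PySem.List.pyGetD a i 0) (PySem.List.pyGetD a j 0) (j - i))).sum := by
    intro i fv
    rw [show (fun fv j =>
        if PySem.List.pyGetD a i 0 ≠ PySem.List.pyGetD a j 0 ∧
           PySem.List.pyGetD a j 0 ≠ PySem.List.pyGetD a i 0 + (j - i) ∧
           PySem.List.pyGetD a j 0 ≠ PySem.List.pyGetD a i 0 - (j - i)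
        then fv + 2 else fv)
      = (fun fv j => fv + non2 (PySem.List.pyGetD a i 0) (PySem.List.pyGetD a j 0) (j - i)) from
      funext fun fv => funext fun j => by unfold non2; split_ifs <;> omega]
    exact PySem.List.foldl_add _ _ _
  calc (PySem.List.pyRange 0 (a.length : Int) 1).foldl _ 0
      = 0 + ((PySem.List.pyRange 0 (a.length : Int) 1).map (fun i =>
          ((PySem.List.pyRange (i+1) (a.length : Int) 1).map
            (fun j => non2 (PySem.List.pyGetD a i 0) (PySem.List.pyGetD a j 0) (j - i))).sum)).sum := by
        rw [show (fun (fv i : Int) =>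
            (PySem.List.pyRange (i + 1) (a.length : Int) 1).foldl (fun fv j =>
              if PySem.List.pyGetD a i 0 ≠ PySem.List.pyGetD a j 0 ∧
                 PySem.List.pyGetD a j 0 ≠ PySem.List.pyGetD a i 0 + (j - i) ∧
                 PySem.List.pyGetD a j 0 ≠ PySem.List.pyGetD a i 0 - (j - i)
              then fv + 2 else fv) fv)
          = (fun fv i => fv + ((PySem.List.pyRange (i+1) (a.length : Int) 1).map
              (fun j => non2 (PySem.List.pyGetD a i 0) (PySem.List.pyGetD a j 0) (j - i))).sum) from
          funext fun fv => funext fun i => hinner i fv]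
        exact PySem.List.foldl_add _ _ _
    _ = pairE non2 (PySem.List.enumerate a) := by
        rw [zero_add, outerRange_eq a non2 (a.length : Int) (a.length : Int).toNat 0 (by omega)]
        rw [show PySem.List.enumerate a
            = (PySem.List.pyRange 0 (a.length : Int) 1).map (fun j => (j, PySem.List.pyGetD a j 0)) from
          by simpa using PySem.List.enumerate_eq_map_pyRange (xs := a) (d := 0)]

-- ===== B-side: the counter fold's att equals pairE eqs3 (enumerate a) =====

def stepB (st : PySem.Dict Int Int × PySem.Dict Int Int × PySem.Dict Int Int × Int)
    (iv : Int × Int) : PySem.Dict Int Int × PySem.Dict Int Int × PySem.Dict Int Int × Int :=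
  let rows := st.1; let diag := st.2.1; let anti := st.2.2.1; let att := st.2.2.2
  let i := iv.1; let v := iv.2
  let att := att + rows.getD v 0 + diag.getD (v - i) 0 + anti.getD (v + i) 0
  let rows := rows.insert v (rows.getD v 0 + 1)
  let diag := diag.insert (v - i) (diag.getD (v - i) 0 + 1)
  let anti := anti.insert (v + i) (anti.getD (v + i) 0 + 1)
  (rows, diag, anti, att)

def key1 (x : Int × Int) : Int := x.2
def key2 (x : Int × Int) : Int := x.2 - x.1
def key3 (x : Int × Int) : Int := x.2 + x.1

def crossOne (p : List (Int × Int)) (x : Int × Int) : Int :=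
  ((p.map key1).count (key1 x) : Int) + ((p.map key2).count (key2 x) : Int)
    + ((p.map key3).count (key3 x) : Int)

def cross : List (Int × Int) → List (Int × Int) → Int
  | _, [] => 0
  | p, x :: t => crossOne p x + cross (p ++ [x]) t

theorem sum_map_add (f g : Int × Int → Int) (l : List (Int × Int)) :
    (l.map (fun y => f y + g y)).sum = (l.map f).sum + (l.map g).sum := by
  induction l with
  | nil => simp
  | cons x t ih => simp only [List.map_cons, List.sum_cons, ih]; ring

theorem counter_snoc (xs : List Int) (x : Int) :
    PySem.Dict.counter (xs ++ [x])
      = (PySem.Dict.counter xs).insert x ((PySem.Dict.counter xs).getD x 0 + 1) := by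
  rw [← PySem.Dict.foldl_insert_getD_add_one_eq_counter,
      ← PySem.Dict.foldl_insert_getD_add_one_eq_counter, List.foldl_append]
  simp

theorem Bloop (l : List (Int × Int)) :
    ∀ (p : List (Int × Int)) (att : Int),
    l.foldl stepB (PySem.Dict.counter (p.map key1), PySem.Dict.counter (p.map key2),
                   PySem.Dict.counter (p.map key3), att)
      = (PySem.Dict.counter ((p ++ l).map key1), PySem.Dict.counter ((p ++ l).map key2),
         PySem.Dict.counter ((p ++ l).map key3), att + cross p l) := by
  induction l with
  | nil => intro p att; simp [cross]
  | cons x t ih =>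
    intro p att
    rw [List.foldl_cons]
    have hstep : stepB (PySem.Dict.counter (p.map key1), PySem.Dict.counter (p.map key2),
                   PySem.Dict.counter (p.map key3), att) x
        = (PySem.Dict.counter ((p ++ [x]).map key1), PySem.Dict.counter ((p ++ [x]).map key2),
           PySem.Dict.counter ((p ++ [x]).map key3), att + crossOne p x) := by
      simp only [stepB, key1, key2, key3, List.map_append, List.map_cons, List.map_nil,
        counter_snoc, PySem.Dict.getD_counter, crossOne, Prod.mk.injEq]
      refine ⟨trivial, trivial, trivial, by ring⟩
    rw [hstep, ih (p ++ [x]) (att + crossOne p x)]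
    simp [cross, List.append_assoc, add_assoc]

theorem crossOne_append (p q : List (Int × Int)) (x : Int × Int) :
    crossOne (p ++ q) x = crossOne p x + crossOne q x := by
  simp [crossOne, List.count_append]
  ring

theorem cross_extract (l : List (Int × Int)) :
    ∀ p, cross p l = (l.map (crossOne p)).sum + cross [] l := by
  induction l with
  | nil => intro p; simp [cross]
  | cons x t ih =>
    intro p
    have h1 : cross p (x :: t) = crossOne p x + cross (p ++ [x]) t := rfl
    have h2 : cross [] (x :: t) = cross ([] ++ [x]) t := by simp [cross, crossOne]
    have hsplit : (t.map (crossOne (p ++ [x]))).sum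
        = (t.map (crossOne p)).sum + (t.map (crossOne ([] ++ [x]))).sum := by
      rw [show t.map (crossOne (p ++ [x]))
          = t.map (fun y => crossOne p y + crossOne ([] ++ [x]) y) from
        List.map_congr_left fun y _ => by
          rw [crossOne_append p [x] y]; simp]
      exact sum_map_add _ _ t
    rw [h1, h2, ih (p ++ [x]), ih ([] ++ [x]), hsplit]
    simp only [List.map_cons, List.sum_cons]
    ring

theorem crossOne_singleton (x y : Int × Int) :
    crossOne [x] y = eqs3 x.2 y.2 (y.1 - x.1) := by
  simp only [crossOne, eqs3, key1, key2, key3, List.map_cons, List.map_nil]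
  rw [List.count_singleton, List.count_singleton, List.count_singleton]
  have e1 : (x.2 == y.2) = decide (x.2 = y.2) := rfl
  have e2 : (x.2 - x.1 == y.2 - y.1) = decide (x.2 - x.1 = y.2 - y.1) := rfl
  have e3 : (x.2 + x.1 == y.2 + y.1) = decide (x.2 + x.1 = y.2 + y.1) := rfl
  rw [e1, e2, e3]
  by_cases h1 : x.2 = y.2 <;> by_cases h2 : x.2 - x.1 = y.2 - y.1 <;>
    by_cases h3 : x.2 + x.1 = y.2 + y.1 <;>
    simp [h1, h2, h3] <;> omega

theorem cross_nil_eq_pairE (l : List (Int × Int)) :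
    cross [] l = pairE eqs3 l := by
  induction l with
  | nil => rfl
  | cons x t ih =>
    have h2 : cross [] (x :: t) = cross ([] ++ [x]) t := by simp [cross, crossOne]
    rw [h2, cross_extract t ([] ++ [x]), ih, List.nil_append]
    simp only [pairE, sumE_eq_sum_map]
    congr 1
    congr 1
    exact List.map_congr_left fun y _ => crossOne_singleton x y

theorem floordiv_two_mul (k : Int) : PySem.Int.floordiv (2 * k) 2 = k := by
  rw [PySem.Int.floordiv_eq_iff_of_pos (by omega)]
  omega

theorem fitnessB_eq (a : List Int) :
    fitnessB a =
      PySem.Int.floordiv ((a.length : Int) * ((a.length : Int) - 1)) 2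
        - pairE eqs3 (PySem.List.enumerate a) := by
  have h := Bloop (PySem.List.enumerate a) [] 0
  have hb : fitnessB a
      = PySem.Int.floordiv ((a.length : Int) * ((a.length : Int) - 1)) 2
        - ((PySem.List.enumerate a).foldl stepB
            (PySem.Dict.counter (([] : List (Int × Int)).map key1),
             PySem.Dict.counter (([] : List (Int × Int)).map key2),
             PySem.Dict.counter (([] : List (Int × Int)).map key3), 0)).2.2.2 := rfl
  rw [hb, h]
  simp [cross_nil_eq_pairE]

theorem fitness_agree (a : List Int) : fitnessA a = fitnessB a := by
  have hA : fitnessA a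
      = PySem.Int.floordiv (pairE non2 (PySem.List.enumerate a)) 2 := by
    simp only [fitnessA]
    rw [fvA_eq]
  rw [hA, fitnessB_eq,
      pairE_pointwise _ (PySem.List.pairwise_lt_enumerate a 0),
      show (2 : Int) * pairE (fun _ _ _ => 1) (PySem.List.enumerate a)
          - 2 * pairE eqs3 (PySem.List.enumerate a)
        = 2 * (pairE (fun _ _ _ => 1) (PySem.List.enumerate a)
            - pairE eqs3 (PySem.List.enumerate a)) from by ring,
      floordiv_two_mul]
  have hlen := pairE_one_two (PySem.List.enumerate a)
  rw [PySem.List.length_enumerate] at hlen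
  rw [show ((a.length : Int)) * ((a.length : Int) - 1)
      = 2 * pairE (fun _ _ _ => 1) (PySem.List.enumerate a) from hlen.symm,
      floordiv_two_mul]

theorem compute_eq (population : List (List Int)) (max_fit : Int) :
    compute population max_fit = compute_alt population max_fit := by
  induction population with
  | nil => rfl
  | cons p rest ih =>
    simp only [compute, compute_alt, fitness_agree p]
    rw [ih]

-- ===== VERDICT (by name: the statement is the Claim_ definition above) =====
theorem compute_spec : Claim_equal_compute := by
  unfold Claim_equal_compute
  intro population max_fit _
  unfold Spec_compute
  exact compute_eq population max_fit
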